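-- pv_equiv track=rewrite | github.com/amitkandari219/trading-system | paper_trading/decay_monitor.py | _portfolio_recommendation
-- ===== SOURCE A (Python) =====
-- def _portfolio_recommendation(results):
--     reds = sum(1 for h in results.values() if h['status'] in ('RED', 'CRITICAL'))
--     if reds >= 2:
--         return 'HALT: Multiple signals degrading. Review regime conditions.'
--     if reds == 1:
--         return 'CAUTION: One signal degrading. Reduce its allocation.'
--     yellows = sum(1 for h in results.values() if h['status'] == 'YELLOW')
--     if yellows >= 2:
--         return 'WATCH: Multiple signals showing early decay.'
--     return 'HEALTHY: All signals performing within expectations.'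
-- ===== SOURCE B (Python) =====
-- def _portfolio_recommendation(results):
--     # Single short-circuiting recursive pass: walk the statuses once, carrying
--     # (reds, yellows) accumulators, and bail out with HALT as soon as two
--     # degrading signals have been seen (A instead does two full scans).
--     statuses = [h['status'] for h in results.values()]
--
--     def go(xs, reds, yellows):
--         if reds >= 2:
--             return 'HALT: Multiple signals degrading. Review regime conditions.'
--         if not xs:
--             if reds == 1:
--                 return 'CAUTION: One signal degrading. Reduce its allocation.'
--             if yellows >= 2:
--                 return 'WATCH: Multiple signals showing early decay.'
--             return 'HEALTHY: All signals performing within expectations.'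
--         s = xs[0]
--         return go(xs[1:],
--                   reds + (1 if s in ('RED', 'CRITICAL') else 0),
--                   yellows + (1 if s == 'YELLOW' else 0))
--
--     return go(statuses, 0, 0)
-- ===== Notes on version B (the rewrite author's own statement) =====
-- stated objective: alternative
-- what changed: B replaces A's two full conditional-sum scans by one short-circuiting recursive pass carrying (reds, yellows) accumulators that returns HALT as soon as the second degrading signal is seen, deciding the remaining cases only at the end of the list.
import Mathlib
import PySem

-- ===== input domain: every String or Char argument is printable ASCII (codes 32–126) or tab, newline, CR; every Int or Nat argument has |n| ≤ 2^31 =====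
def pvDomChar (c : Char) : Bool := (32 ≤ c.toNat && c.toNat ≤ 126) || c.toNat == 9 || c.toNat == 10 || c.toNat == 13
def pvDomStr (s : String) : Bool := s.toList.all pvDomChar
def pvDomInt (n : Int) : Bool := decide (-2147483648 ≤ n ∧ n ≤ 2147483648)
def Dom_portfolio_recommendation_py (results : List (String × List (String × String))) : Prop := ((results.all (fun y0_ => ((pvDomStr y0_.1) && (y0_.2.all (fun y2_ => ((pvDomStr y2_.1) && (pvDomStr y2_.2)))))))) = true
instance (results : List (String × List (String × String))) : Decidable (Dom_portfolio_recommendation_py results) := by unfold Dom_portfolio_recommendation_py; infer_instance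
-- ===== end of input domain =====

-- B replaces A's two full conditional-sum scans by one short-circuiting recursive pass
-- with (reds, yellows) accumulators that returns HALT as soon as the second degrading
-- signal is seen; objective: alternative decomposition, same cost.

-- ===== PORT A =====
-- h['status'] under Pre_ (the key is present); getD is only used where Pre_ guarantees the key
def pvStatus (h : List (String × String)) : String := (PySem.Dict.ofList h).getD "status" ""

def portfolio_recommendation_py (results : List (String × List (String × String))) : String :=
  let vs := (PySem.Dict.ofList results).values
  let reds : Int := vs.foldl (fun n h => if pvStatus h = "RED" ∨ pvStatus h = "CRITICAL" then n + 1 else n) 0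
  if reds ≥ 2 then "HALT: Multiple signals degrading. Review regime conditions."
  else if reds = 1 then "CAUTION: One signal degrading. Reduce its allocation."
  else
    let yellows : Int := vs.foldl (fun n h => if pvStatus h = "YELLOW" then n + 1 else n) 0
    if yellows ≥ 2 then "WATCH: Multiple signals showing early decay."
    else "HEALTHY: All signals performing within expectations."

-- ===== PORT B =====
-- Source B's inner 'go': one recursive pass with early HALT exit
def pvGo : List String → Int → Int → String
  | xs, reds, yellows =>
    if reds ≥ 2 then "HALT: Multiple signals degrading. Review regime conditions."
    else
      match xs with
      | [] =>
        if reds = 1 then "CAUTION: One signal degrading. Reduce its allocation."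
        else if yellows ≥ 2 then "WATCH: Multiple signals showing early decay."
        else "HEALTHY: All signals performing within expectations."
      | s :: t =>
        pvGo t (reds + (if s = "RED" ∨ s = "CRITICAL" then 1 else 0))
               (yellows + (if s = "YELLOW" then 1 else 0))

def portfolio_recommendation_py_alt (results : List (String × List (String × String))) : String :=
  let statuses := ((PySem.Dict.ofList results).values).map pvStatus
  pvGo statuses 0 0

-- ===== PRECONDITION & SPEC =====
-- Pre_: every signal's health dict has a 'status' key; otherwise A raises KeyError inside its comprehension.
def Pre_portfolio_recommendation_py (results : List (String × List (String × String))) : Prop :=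
  ∀ h ∈ (PySem.Dict.ofList results).values, (PySem.Dict.ofList h).contains "status" = true
instance (results : List (String × List (String × String))) : Decidable (Pre_portfolio_recommendation_py results) := by unfold Pre_portfolio_recommendation_py; infer_instance

def pvWitness_portfolio_recommendation_py : (List (String × List (String × String))) :=
  [("alpha", [("status", "RED")]), ("beta", [("status", "GREEN")])]

def Spec_portfolio_recommendation_py (results : List (String × List (String × String))) (out : String) : Prop := out = portfolio_recommendation_py_alt results
instance (results : List (String × List (String × String))) (out : String) : Decidable (Spec_portfolio_recommendation_py results out) := by unfold Spec_portfolio_recommendation_py; infer_instance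

-- ===== CLAIM =====
def Claim_equal_portfolio_recommendation_py : Prop := ∀ (results : List (String × List (String × String))), Dom_portfolio_recommendation_py results → Pre_portfolio_recommendation_py results → Spec_portfolio_recommendation_py results (portfolio_recommendation_py results)

-- ===== LEMMAS AND PROOFS =====

-- the common decision table both programs compute, as a function of the two totals
def pvDecide (R Y : Int) : String :=
  if R ≥ 2 then "HALT: Multiple signals degrading. Review regime conditions."
  else if R = 1 then "CAUTION: One signal degrading. Reduce its allocation."
  else if Y ≥ 2 then "WATCH: Multiple signals showing early decay."
  else "HEALTHY: All signals performing within expectations."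

-- B's short-circuiting recursion computes the decision on the final totals.
lemma pvGo_eq (xs : List String) (r y : Int) :
    pvGo xs r y
      = pvDecide (r + ((xs.count "RED" : Int) + (xs.count "CRITICAL" : Int)))
                 (y + (xs.count "YELLOW" : Int)) := by
  induction xs generalizing r y with
  | nil => simp [pvGo, pvDecide]
  | cons s t ih =>
    rw [pvGo, ih]
    by_cases hr : r ≥ 2
    · have h1 : (0:Int) ≤ ((s :: t).count "RED" : Int) := by positivity
      have h2 : (0:Int) ≤ ((s :: t).count "CRITICAL" : Int) := by positivity
      simp only [hr, if_pos, pvDecide]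
      rw [if_pos (by omega)]
    · simp only [hr, if_neg, List.count_cons]
      by_cases e1 : s = "RED" <;> by_cases e2 : s = "CRITICAL" <;> by_cases e3 : s = "YELLOW" <;>
        simp_all <;> (congr 1 <;> push_cast <;> ring)

-- A's counting fold equals list.count of the mapped statuses (two target statuses).
lemma foldl_two_count (st : List (String × String) → String) (a b : String) (hab : a ≠ b)
    (vs : List (List (String × String))) (c : Int) :
    vs.foldl (fun n h => if st h = a ∨ st h = b then n + 1 else n) c
      = c + ((vs.map st).count a : Int) + ((vs.map st).count b : Int) := by
  induction vs generalizing c with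
  | nil => simp
  | cons h t ih =>
    simp only [List.foldl_cons, List.map_cons, List.count_cons, ih]
    by_cases h1 : st h = a <;> by_cases h2 : st h = b <;>
      simp [h1, h2, hab, Ne.symm hab, beq_iff_eq] <;> push_cast <;> omega

lemma foldl_one_count (st : List (String × String) → String) (a : String)
    (vs : List (List (String × String))) (c : Int) :
    vs.foldl (fun n h => if st h = a then n + 1 else n) c
      = c + ((vs.map st).count a : Int) := by
  induction vs generalizing c with
  | nil => simp
  | cons h t ih =>
    simp only [List.foldl_cons, List.map_cons, List.count_cons, ih]
    by_cases h1 : st h = a <;> simp [h1, beq_iff_eq] <;> push_cast <;> omega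

-- ===== VERDICT =====
theorem portfolio_recommendation_py_spec : Claim_equal_portfolio_recommendation_py := by
  intro results _ _
  unfold Spec_portfolio_recommendation_py portfolio_recommendation_py portfolio_recommendation_py_alt
  rw [pvGo_eq]
  simp only [foldl_two_count pvStatus "RED" "CRITICAL" (by decide),
    foldl_one_count pvStatus "YELLOW", pvDecide]
  norm_num
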